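-- pv_equiv track=rewrite | github.com/Cordeliali/ticket_n_receipt | output_ticketsale.py | pdf_escape
-- ===== SOURCE A (Python) =====
-- def pdf_escape(text):
--     # Keep content-stream strings stable in basic Latin for Helvetica.
--     safe = []
--     for ch in text:
--         if ord(ch) < 32 or ord(ch) > 126:
--             safe.append("?")
--         else:
--             safe.append(ch)
--     return "".join(safe).replace("\\", "\\\\").replace("(", "\\(").replace(")", "\\)")
-- ===== SOURCE B (Python) =====
-- def pdf_escape(text):
--     # Single sweep: map each character straight to its final escaped piece.
--     def piece(ch):
--         o = ord(ch)
--         if o < 32 or o > 126: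
--             return "?"
--         if ch == "\\":
--             return "\\\\"
--         if ch == "(":
--             return "\\("
--         if ch == ")":
--             return "\\)"
--         return ch
--     return "".join(piece(ch) for ch in text)
-- ===== Notes on version B (the rewrite author's own statement) =====
-- stated objective: simpler
-- what changed: Replaces A's sanitize loop plus three sequential whole-string .replace() passes with one single pass that maps each character directly to its final escaped form and joins once.
import Mathlib
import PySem

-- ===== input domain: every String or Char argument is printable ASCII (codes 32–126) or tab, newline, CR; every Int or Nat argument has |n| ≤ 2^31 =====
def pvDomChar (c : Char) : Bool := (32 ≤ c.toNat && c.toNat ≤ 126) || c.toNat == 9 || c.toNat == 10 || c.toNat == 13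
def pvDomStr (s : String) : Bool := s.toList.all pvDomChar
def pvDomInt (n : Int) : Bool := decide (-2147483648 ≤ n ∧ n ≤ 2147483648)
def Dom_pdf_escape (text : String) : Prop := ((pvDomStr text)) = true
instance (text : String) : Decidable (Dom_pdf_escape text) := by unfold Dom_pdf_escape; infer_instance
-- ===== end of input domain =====

-- B replaces A's sanitize loop plus three sequential .replace() passes with one
-- per-character pass mapping each char to its final escaped piece (objective: simpler).


-- ===== PORT A =====
-- the sanitize loop: safe.append("?") / safe.append(ch)
def pdf_escape (text : String) : String :=
  let safe : List String :=
    text.toList.foldl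
      (fun acc ch =>
        if ch.toNat < 32 || ch.toNat > 126 then acc ++ ["?"] else acc ++ [String.ofList [ch]])
      []
  PySem.Str.replace
    (PySem.Str.replace
      (PySem.Str.replace (PySem.Str.join "" safe) "\\" "\\\\")
      "(" "\\(")
    ")" "\\)"

-- ===== PORT B =====
def pdf_escape_piece (ch : Char) : List Char :=
  if ch.toNat < 32 || ch.toNat > 126 then ['?']
  else if ch = '\\' then ['\\', '\\']
  else if ch = '(' then ['\\', '(']
  else if ch = ')' then ['\\', ')']
  else [ch]

def pdf_escape_alt (text : String) : String :=
  String.ofList (text.toList.flatMap pdf_escape_piece)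

-- ===== PRECONDITION & SPEC =====
def Spec_pdf_escape (text : String) (out : String) : Prop := out = pdf_escape_alt text
instance (text : String) (out : String) : Decidable (Spec_pdf_escape text out) := by unfold Spec_pdf_escape; infer_instance

-- ===== CLAIM (what is proved, stated in full; the proofs are below) =====
def Claim_equal_pdf_escape : Prop := ∀ (text : String), Dom_pdf_escape text → Spec_pdf_escape text (pdf_escape text)

-- ===== LEMMAS AND PROOFS =====

-- the sanitize map used by A
def pdfSan (c : Char) : Char := if c.toNat < 32 || c.toNat > 126 then '?' else c

lemma pdf_foldl_safe (l : List Char) (acc : List String) :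
    l.foldl
      (fun acc ch =>
        if ch.toNat < 32 || ch.toNat > 126 then acc ++ ["?"] else acc ++ [String.ofList [ch]])
      acc = acc ++ l.map (fun ch => String.ofList [pdfSan ch]) := by
  induction l generalizing acc with
  | nil => simp
  | cons c t ih =>
    simp only [List.foldl_cons, List.map_cons, ih, pdfSan]
    split_ifs <;> simp

-- replace with a single-char pattern is a per-char flatMap
lemma replace_go_single (o : Char) (new : List Char) (l acc : List Char) (fuel : Nat)
    (h : l.length ≤ fuel) :
    PySem.Chars.replace.go [o] new fuel l acc
      = acc.reverse ++ l.flatMap (fun c => if c = o then new else [c]) := by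
  induction l generalizing fuel acc with
  | nil => cases fuel <;> simp [PySem.Chars.replace.go]
  | cons c t ih =>
    cases fuel with
    | zero => simp at h
    | succ f =>
      simp only [List.length_cons, Nat.succ_le_succ_iff] at h
      simp only [PySem.Chars.replace.go, List.isPrefixOf, List.flatMap_cons]
      by_cases hc : o = c
      · subst hc
        simp only [beq_self_eq_true, Bool.true_and, if_true,
          List.length_cons, List.length_nil]
        rw [show List.drop 1 (o :: t) = t from rfl, ih _ _ h]
        simp
      · have : (o == c) = false := by simp [hc]
        simp only [this, Bool.false_and]
        rw [ih _ _ h]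
        simp [Ne.symm hc]

lemma replace_single (o : Char) (new s : List Char) :
    PySem.Chars.replace s [o] new = s.flatMap (fun c => if c = o then new else [c]) := by
  rw [PySem.Chars.replace]
  simp only [List.isEmpty_cons, if_false, Bool.false_eq_true]
  exact replace_go_single o new s [] s.length le_rfl

lemma pdf_escape_toList (text : String) :
    (pdf_escape text).toList = text.toList.flatMap pdf_escape_piece := by
  unfold pdf_escape
  simp only [PySem.Str.toList_replace, pdf_foldl_safe, List.nil_append]
  have hjoin : (PySem.Str.join "" (text.toList.map (fun ch => String.ofList [pdfSan ch]))).toList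
      = text.toList.map pdfSan := by
    rw [PySem.Str.toList_join]
    simp only [List.map_map]
    have : (List.map (String.toList ∘ fun ch => String.ofList [pdfSan ch]) text.toList)
        = (text.toList.map pdfSan).map (fun c => [c]) := by
      simp [Function.comp_def, List.map_map]
    rw [this]
    exact PySem.Chars.join_nil_singletons _
  rw [hjoin]
  rw [show ("\\" : String).toList = ['\\'] from rfl,
      show ("\\\\" : String).toList = ['\\', '\\'] from rfl,
      show ("(" : String).toList = ['('] from rfl,
      show ("\\(" : String).toList = ['\\', '('] from rfl,
      show (")" : String).toList = [')'] from rfl,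
      show ("\\)" : String).toList = ['\\', ')'] from rfl]
  rw [replace_single, replace_single, replace_single]
  simp only [List.flatMap_map, List.flatMap_assoc]
  apply List.flatMap_congr
  intro c _
  by_cases h1 : c.toNat < 32 || c.toNat > 126
  · simp [pdfSan, pdf_escape_piece, h1]
  · by_cases h2 : c = '\\'
    · subst h2; simp [pdfSan, pdf_escape_piece] at h1 ⊢
    · by_cases h3 : c = '('
      · subst h3; simp [pdfSan, pdf_escape_piece] at h1 ⊢
      · by_cases h4 : c = ')'
        · subst h4; simp [pdfSan, pdf_escape_piece] at h1 ⊢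
        · simp [pdfSan, pdf_escape_piece, h1, h2, h3, h4]

-- ===== VERDICT (by name: the statement is the Claim_ definition above) =====
theorem pdf_escape_spec : Claim_equal_pdf_escape := by
  intro text _
  show pdf_escape text = pdf_escape_alt text
  have h := pdf_escape_toList text
  unfold pdf_escape_alt
  rw [← h]
  exact String.ofList_toList.symm
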